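-- pv_equiv track=rewrite | github.com/colefuerth/AdventOfCode2024 | day24/AoC.py | solve
-- ===== SOURCE A (Python) =====
-- from typing import List, Dict
--
-- def solve(
--     register: str,
--     known: Dict[str, int],
--     gates: Dict[str, List[str]],
--     dependency_tree: List[str] = None,
-- ) -> int:
--     if register in known:
--         return known[register]
--     if dependency_tree is None:
--         dependency_tree = []
--     if register in dependency_tree:
--         raise ValueError(f"Circular dependency detected: {register}")
--     dependency_tree.append(register)
--     a, operator, b = gates[register]
--     a, b = solve(a, known, gates, dependency_tree), solve(
--         b, known, gates, dependency_tree
--     )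
--     match operator:
--         case "AND":
--             c = a & b
--         case "OR":
--             c = a | b
--         case "XOR":
--             c = a ^ b
--     known[register] = c
--     return c
-- ===== SOURCE B (Python) =====
-- def solve(register, known, gates, dependency_tree=None):
--     if dependency_tree is None:
--         dependency_tree = []
--     ops = {"AND": lambda x, y: x & y, "OR": lambda x, y: x | y, "XOR": lambda x, y: x ^ y}
--     entered = set()
--     stack = [register]
--     while stack:
--         reg = stack[-1]
--         if reg in known:
--             stack.pop()
--         elif reg not in entered:
--             if reg in dependency_tree:
--                 raise ValueError(f"Circular dependency detected: {reg}")
--             entered.add(reg)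
--             dependency_tree.append(reg)
--             a, op, b = gates[reg]
--             stack.append(b)
--             stack.append(a)
--         else:
--             a, op, b = gates[reg]
--             if a in known and b in known:
--                 known[reg] = ops[op](known[a], known[b])
--                 stack.pop()
--             else:
--                 raise ValueError(f"Circular dependency detected: {reg}")
--     return known[register]
-- ===== Notes on version B (the rewrite author's own statement) =====
-- stated objective: alternative
-- what changed: A's recursive memoized DFS with an implicit call stack is replaced by an iterative DFS over an explicit stack that pushes a gate's operands above it and applies the gate when it resurfaces with both operands known, with an 'entered' set distinguishing this traversal's pushes from the caller-supplied dependency_tree.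
import Mathlib
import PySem

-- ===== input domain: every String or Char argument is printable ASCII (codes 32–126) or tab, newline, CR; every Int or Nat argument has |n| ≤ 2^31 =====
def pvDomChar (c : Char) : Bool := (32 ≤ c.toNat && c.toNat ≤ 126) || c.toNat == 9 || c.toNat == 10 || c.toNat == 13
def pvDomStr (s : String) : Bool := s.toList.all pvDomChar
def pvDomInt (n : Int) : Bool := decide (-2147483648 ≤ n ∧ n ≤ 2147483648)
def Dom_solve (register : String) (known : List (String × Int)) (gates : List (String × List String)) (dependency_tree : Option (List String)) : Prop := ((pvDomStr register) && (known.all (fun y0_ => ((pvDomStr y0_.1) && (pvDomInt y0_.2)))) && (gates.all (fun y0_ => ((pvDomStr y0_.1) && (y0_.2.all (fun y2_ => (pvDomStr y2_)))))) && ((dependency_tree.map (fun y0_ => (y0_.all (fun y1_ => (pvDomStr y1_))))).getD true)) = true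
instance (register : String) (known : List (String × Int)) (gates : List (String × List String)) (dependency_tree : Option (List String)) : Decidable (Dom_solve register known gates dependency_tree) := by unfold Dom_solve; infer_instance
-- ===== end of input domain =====

-- B replaces A's recursive memoized DFS (implicit call stack) by an iterative DFS over an
-- explicit stack (objective: alternative, same cost). A mutates `known`/`dependency_tree` in
-- place; B performs the same mutations; the equivalence proved here is about the RETURN value.

-- ===== PORT A =====
-- `match operator` of A: no matching case leaves `c` unbound (UnboundLocalError) = none.
def pvOpA? (op : String) (x y : Int) : Option Int :=
  match op with
  | "AND" => some (PySem.Int.band x y)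
  | "OR" => some (PySem.Int.bor x y)
  | "XOR" => some (PySem.Int.bxor x y)
  | _ => none

-- Recursive DFS of A; the Python mutates `known`/`dependency_tree`, so the port threads them as
-- state; `none` is exactly where the Python raises (ValueError on a cycle, KeyError / unpacking
-- ValueError on a bad gate, UnboundLocalError on a bad operator). Fuel only makes the recursion
-- total: each recursing frame appends a fresh gate key to the path (a revisited one is a raise),
-- so depth never exceeds gates.length + 1.
def solveAuxA : Nat → String → PySem.Dict String Int → PySem.Dict String (List String) →
    List String → Option (Int × PySem.Dict String Int × List String)
  | 0, _, _, _, _ => none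
  | fuel + 1, x, k, g, dt =>
    match k.get? x with
    | some v => some (v, k, dt)
    | none =>
      if x ∈ dt then none  -- Python: raise ValueError
      else
        match g.get? x with
        | some [a, op, b] =>
          match solveAuxA fuel a k g (dt ++ [x]) with
          | none => none
          | some (va, k1, dt1) =>
            match solveAuxA fuel b k1 g dt1 with
            | none => none
            | some (vb, k2, dt2) =>
              match pvOpA? op va vb with
              | some c => some (c, k2.insert x c, dt2)
              | none => none
        | _ => none  -- Python: KeyError / unpacking ValueError

def solve (register : String) (known : List (String × Int)) (gates : List (String × List String)) (dependency_tree : Option (List String)) : Int :=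
  match solveAuxA (gates.length + 1) register (PySem.Dict.ofList known) (PySem.Dict.ofList gates) (dependency_tree.getD []) with
  | some (v, _, _) => v
  | none => 0

-- ===== PORT B =====
-- Source B's `ops` table of lambdas; `pvOpsB? op x y` = `ops[op](x, y)` (KeyError = none).
def pvOpsTableB : List (String × (Int → Int → Int)) :=
  [("AND", fun x y => PySem.Int.band x y), ("OR", fun x y => PySem.Int.bor x y),
   ("XOR", fun x y => PySem.Int.bxor x y)]

def pvOpsB? (op : String) (x y : Int) : Option Int :=
  (pvOpsTableB.lookup op).map (fun f => f x y)

-- Source B's while-loop; the Lean list head is the Python stack top; `e` is Source B's `entered` set;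
-- `none` is exactly where Source B raises. Fuel only makes the loop total: each entered register is a
-- fresh gate key costing 2 steps (push + apply) plus one pop per operand visit, so
-- 3 * (#gate keys) + 1 steps always suffice (proved in the simulation lemma below).
def solveAltLoop : Nat → List String → PySem.Dict String Int → PySem.Dict String (List String) →
    List String → PySem.Set String → Option (PySem.Dict String Int)
  | _, [], k, _, _, _ => some k
  | 0, _ :: _, _, _, _, _ => none
  | fuel + 1, reg :: rest, k, g, dt, e =>
    if (k.get? reg).isSome then solveAltLoop fuel rest k g dt e
    else if reg ∈ e then
      -- resurfaced: apply the gate to the resolved operands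
      match g.get? reg with
      | some [a, op, b] =>
        match k.get? a, k.get? b with
        | some va, some vb =>
          match pvOpsB? op va vb with
          | some c => solveAltLoop fuel rest (k.insert reg c) g dt e
          | none => none  -- Source B: KeyError on ops[op]
        | _, _ => none  -- Source B: raise ValueError
      | _ => none
    else if reg ∈ dt then none  -- Source B: raise ValueError
    else
      match g.get? reg with
      | some [a, _, b] =>
        solveAltLoop fuel (a :: b :: reg :: rest) k g (dt ++ [reg]) (PySem.Set.add e reg)
      | _ => none  -- Source B: KeyError / unpacking ValueError

def solve_alt (register : String) (known : List (String × Int)) (gates : List (String × List String)) (dependency_tree : Option (List String)) : Int :=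
  let g := PySem.Dict.ofList gates
  match solveAltLoop (3 * g.keys.length + 1) [register] (PySem.Dict.ofList known) g (dependency_tree.getD []) PySem.Set.empty with
  | some k => k.getD register 0
  | none => 0

-- ===== PRECONDITION & SPEC =====
-- `pvLayer g k dt0 n` = the registers whose value is determined within n levels of well-formed
-- gates (valid operator, operands known or determined one level earlier) avoiding dt0 — a
-- graph-layering (evaluability/acyclicity) condition on the circuit, not a run of either program.
def pvLayer (g : PySem.Dict String (List String)) (k : PySem.Dict String Int) (dt0 : List String) : Nat → List String
  | 0 => []
  | n + 1 =>
    g.keys.filter fun x =>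
      !dt0.contains x &&
      match g.get? x with
      | some [a, op, b] =>
        (op == "AND" || op == "OR" || op == "XOR") &&
        ((k.get? a).isSome || (pvLayer g k dt0 n).contains a) &&
        ((k.get? b).isSome || (pvLayer g k dt0 n).contains b)
      | _ => false

-- Pre_ = exactly the inputs on which the Python A returns: the register is already known, or its
-- value is determined by an acyclic chain of well-formed gates none of which lies on the
-- caller-supplied dependency_tree (on every other input A raises ValueError / KeyError /
-- UnboundLocalError, which the ports mark as `none`).
def Pre_solve (register : String) (known : List (String × Int)) (gates : List (String × List String)) (dependency_tree : Option (List String)) : Prop :=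
  ((PySem.Dict.ofList known).get? register).isSome = true ∨
    register ∈ pvLayer (PySem.Dict.ofList gates) (PySem.Dict.ofList known) (dependency_tree.getD []) gates.length
instance (register : String) (known : List (String × Int)) (gates : List (String × List String)) (dependency_tree : Option (List String)) : Decidable (Pre_solve register known gates dependency_tree) := by unfold Pre_solve; infer_instance

def pvWitness_solve : String × (List (String × Int)) × (List (String × List String)) × Option (List String) :=
  ("z", [("x", 1), ("y", 0)], [("z", ["w", "AND", "y"]), ("w", ["x", "OR", "y"])], none)

def Spec_solve (register : String) (known : List (String × Int)) (gates : List (String × List String)) (dependency_tree : Option (List String)) (out : Int) : Prop := out = solve_alt register known gates dependency_tree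
instance (register : String) (known : List (String × Int)) (gates : List (String × List String)) (dependency_tree : Option (List String)) (out : Int) : Decidable (Spec_solve register known gates dependency_tree out) := by unfold Spec_solve; infer_instance

-- ===== CLAIM (what is proved, stated in full; the proofs are below) =====
def Claim_equal_solve : Prop := ∀ (register : String) (known : List (String × Int)) (gates : List (String × List String)) (dependency_tree : Option (List String)), Dom_solve register known gates dependency_tree → Pre_solve register known gates dependency_tree → Spec_solve register known gates dependency_tree (solve register known gates dependency_tree)

-- ===== LEMMAS AND PROOFS =====

-- Source B's ops-table lookup computes exactly what A's `match operator` computes.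
lemma pvOps_agree (op : String) (x y : Int) : pvOpsB? op x y = pvOpA? op x y := by
  by_cases h1 : op = "AND"
  · subst h1; rfl
  by_cases h2 : op = "OR"
  · subst h2; rfl
  by_cases h3 : op = "XOR"
  · subst h3; rfl
  have e1 : (op == "AND") = false := beq_eq_false_iff_ne.mpr h1
  have e2 : (op == "OR") = false := beq_eq_false_iff_ne.mpr h2
  have e3 : (op == "XOR") = false := beq_eq_false_iff_ne.mpr h3
  simp [pvOpsB?, pvOpsTableB, List.lookup, pvOpA?, e1, e2, e3]

-- A successful run of A's DFS: the memo only grows, the result is memoised, the path is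
-- extended by fresh unknown gate keys (all memoised on completion), and no key already on the
-- path gets memoised.
lemma auxA_facts (fuel : Nat) :
    ∀ (x : String) (k : PySem.Dict String Int) (g : PySem.Dict String (List String))
      (dt : List String) (v : Int) (k' : PySem.Dict String Int) (dt' : List String),
    solveAuxA fuel x k g dt = some (v, k', dt') →
    (∀ z w, k.get? z = some w → k'.get? z = some w) ∧
    k'.get? x = some v ∧
    (∃ ext, dt' = dt ++ ext ∧ ext.Nodup ∧
      ∀ y ∈ ext, y ∉ dt ∧ k.get? y = none ∧ (k'.get? y).isSome ∧ (g.get? y).isSome) ∧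
    (∀ y, k.get? y = none → y ∈ dt → k'.get? y = none) := by
  induction fuel with
  | zero => intro x k g dt v k' dt' h; simp [solveAuxA] at h
  | succ fuel ih =>
    intro x k g dt v k' dt' h
    simp only [solveAuxA] at h
    cases hk : k.get? x with
    | some w =>
      rw [hk] at h
      simp only [Option.some.injEq, Prod.mk.injEq] at h
      obtain ⟨hv, hk', hdt'⟩ := h
      subst hv; subst hk'; subst hdt'
      refine ⟨fun z w hz => hz, hk, ⟨[], by simp⟩, fun y hy _ => hy⟩
    | none =>
      rw [hk] at h
      by_cases hdt : x ∈ dt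
      · simp [hdt] at h
      · simp only [hdt, if_false] at h
        cases hg : g.get? x with
        | none => rw [hg] at h; simp at h
        | some l =>
          rw [hg] at h
          match l, h with
          | [], h => simp at h
          | [_], h => simp at h
          | [_, _], h => simp at h
          | _ :: _ :: _ :: _ :: _, h => simp at h
          | [a, op, b], h =>
            dsimp only at h
            cases ha : solveAuxA fuel a k g (dt ++ [x]) with
            | none => rw [ha] at h; simp at h
            | some ra =>
              obtain ⟨va, k1, dt1⟩ := ra
              rw [ha] at h
              dsimp only at h
              cases hb : solveAuxA fuel b k1 g dt1 with
              | none => rw [hb] at h; simp at h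
              | some rb =>
                obtain ⟨vb, k2, dt2⟩ := rb
                rw [hb] at h
                dsimp only at h
                cases hc : pvOpA? op va vb with
                | none => rw [hc] at h; simp at h
                | some c =>
                  rw [hc] at h
                  dsimp only at h
                  simp only [Option.some.injEq, Prod.mk.injEq] at h
                  obtain ⟨hv, hk', hdt'⟩ := h
                  subst hv; subst hk'; subst hdt'
                  obtain ⟨monoA, selfA, ⟨extA, hdtA, ndA, memA⟩, pathA⟩ := ih a k g (dt ++ [x]) va k1 dt1 ha
                  obtain ⟨monoB, selfB, ⟨extB, hdtB, ndB, memB⟩, pathB⟩ := ih b k1 g dt1 vb k2 dt2 hb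
                  subst hdtA; subst hdtB
                  have hins : ∀ z, (k2.insert x c).get? z = if z = x then some c else k2.get? z :=
                    by intro z; rw [PySem.Dict.get?_insert]
                  constructor
                  · -- mono
                    intro z w hz
                    rw [hins]
                    split
                    · next hzx => subst hzx; rw [hk] at hz; exact absurd hz (by simp)
                    · exact monoB z w (monoA z w hz)
                  refine ⟨by rw [hins]; simp, ?_, ?_⟩
                  · -- ext
                    refine ⟨[x] ++ extA ++ extB, by simp, ?_, ?_⟩
                    · -- Nodup
                      have hxA : x ∉ extA := fun hx => (memA x hx).1 (by simp)
                      have hxB : x ∉ extB := fun hx => (memB x hx).1 (by simp)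
                      have hAB : ∀ y ∈ extB, y ∉ extA := fun y hy hyA =>
                        (memB y hy).1 (by simp [hyA])
                      simp only [List.cons_append, List.nil_append, List.nodup_cons]
                      refine ⟨by simp [hxA, hxB], ?_⟩
                      exact List.Nodup.append ndA ndB (fun y hy hy2 => hAB y hy2 hy)
                    · intro y hy
                      simp only [List.cons_append, List.nil_append, List.mem_cons, List.mem_append] at hy
                      rcases hy with hy | hy | hy
                      · subst hy
                        refine ⟨hdt, hk, ?_, by simp [hg]⟩
                        rw [hins]; simp
                      · obtain ⟨h1, h2, h3, h4⟩ := memA y hy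
                        have h1' : y ∉ dt := fun hc2 => h1 (by simp [hc2])
                        have h2' : k.get? y = none := h2
                        refine ⟨h1', h2', ?_, h4⟩
                        obtain ⟨w, hw⟩ := Option.isSome_iff_exists.mp h3
                        have := monoB y w hw
                        rw [hins]; split <;> simp [this]
                      · obtain ⟨h1, h2, h3, h4⟩ := memB y hy
                        have h1' : y ∉ dt := fun hc2 => h1 (by simp [hc2])
                        have h2' : k.get? y = none := by
                          cases hz : k.get? y with
                          | none => rfl
                          | some w => exact absurd (monoA y w hz) (by simp [h2])
                        refine ⟨h1', h2', ?_, h4⟩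
                        rw [hins]; split <;> simp [h3]
                  · -- path none preserved
                    intro y hy hydt
                    have hyx : y ≠ x := fun hc2 => hdt (hc2 ▸ hydt)
                    have h1 : k1.get? y = none := pathA y hy (by simp [hydt])
                    have h2 : k2.get? y = none := pathB y h1 (by simp [hydt])
                    rw [hins]; simp [hyx, h2]

lemma auxA_known (fuel : Nat) (x : String) (k : PySem.Dict String Int)
    (g : PySem.Dict String (List String)) (dt : List String) (v : Int)
    (h : k.get? x = some v) (hf : 0 < fuel) :
    solveAuxA fuel x k g dt = some (v, k, dt) := by
  cases fuel with
  | zero => omega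
  | succ f => simp [solveAuxA, h]

-- Under Pre_'s layering condition A's DFS returns (no raise, and gates.length + 1 fuel is enough).
lemma cleanA (r : Nat) :
    ∀ (g : PySem.Dict String (List String)) (K0 k : PySem.Dict String Int) (dt0 : List String)
      (x : String) (dt : List String) (fuel : Nat),
    r < fuel →
    x ∈ pvLayer g K0 dt0 r →
    (∀ m, m < r → x ∉ pvLayer g K0 dt0 m) →
    (∀ z, (K0.get? z).isSome → (k.get? z).isSome) →
    (∀ y ∈ dt, (k.get? y).isSome = true ∨ ∀ m, y ∈ pvLayer g K0 dt0 m → r < m) →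
    ∃ v k' dt', solveAuxA fuel x k g dt = some (v, k', dt') := by
  induction r using Nat.strong_induction_on with
  | _ r ih =>
  intro g K0 k dt0 x dt fuel hfuel hx hmin hK0 hinv
  cases hkx : k.get? x with
  | some v => exact ⟨v, k, dt, auxA_known fuel x k g dt v hkx (by omega)⟩
  | none =>
    cases r with
    | zero => simp [pvLayer] at hx
    | succ m =>
    have hxL := hx
    simp only [pvLayer, List.mem_filter] at hx
    obtain ⟨hxkeys, hcond⟩ := hx
    cases hgx : g.get? x with
    | none => rw [hgx] at hcond; simp at hcond
    | some l =>
      rw [hgx] at hcond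
      match l, hcond with
      | [], hcond => simp at hcond
      | [_], hcond => simp at hcond
      | [_, _], hcond => simp at hcond
      | _ :: _ :: _ :: _ :: _, hcond => simp at hcond
      | [a, op, b], hcond =>
      dsimp only at hcond
      simp only [Bool.and_eq_true, Bool.or_eq_true, beq_iff_eq, Bool.not_eq_true',
        List.contains_eq_mem, decide_eq_true_eq, decide_eq_false_iff_not,
        Option.isSome_iff_exists] at hcond
      obtain ⟨hxdt0, ⟨hop, hA⟩, hB⟩ := hcond
      clear hcond hxL
      -- x is not on the path
      have hxdt : x ∉ dt := by
        intro hxdt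
        rcases hinv x hxdt with h | h
        · rw [hkx] at h; simp at h
        · exact absurd (h (m + 1) (by
            simp only [pvLayer, List.mem_filter]
            refine ⟨hxkeys, ?_⟩
            rw [hgx]
            dsimp only
            simp only [Bool.and_eq_true, Bool.or_eq_true, beq_iff_eq, Bool.not_eq_true',
              List.contains_eq_mem, decide_eq_true_eq, decide_eq_false_iff_not,
              Option.isSome_iff_exists]
            exact ⟨hxdt0, ⟨hop, hA⟩, hB⟩)) (by omega)
      cases fuel with
      | zero => omega
      | succ f =>
      have hmf : m < f := by omega
      -- resolve operand a
      obtain ⟨va, k1, dt1, ha⟩ :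
          ∃ va k1 dt1, solveAuxA f a k g (dt ++ [x]) = some (va, k1, dt1) := by
        cases hka : k.get? a with
        | some w => exact ⟨w, k, dt ++ [x], auxA_known f a k g (dt ++ [x]) w hka (by omega)⟩
        | none =>
          have haL : a ∈ pvLayer g K0 dt0 m := by
            rcases hA with ⟨w, hw⟩ | h
            · have := hK0 a (by simp [hw])
              rw [hka] at this; simp at this
            · exact h
          have hexa : ∃ n, a ∈ pvLayer g K0 dt0 n := ⟨m, haL⟩
          obtain ⟨va, k1, dt1, h⟩ := ih (Nat.find hexa) (by
              have := Nat.find_min' hexa haL; omega)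
            g K0 k dt0 a (dt ++ [x]) f (by have := Nat.find_min' hexa haL; omega)
            (Nat.find_spec hexa) (fun m' hm' => Nat.find_min hexa hm') hK0
            (by
              intro y hy
              rcases List.mem_append.mp hy with hy | hy
              · rcases hinv y hy with h | h
                · exact Or.inl h
                · exact Or.inr fun m' hm' => by
                    have h1 := h m' hm'
                    have h2 := Nat.find_min' hexa haL
                    omega
              · have hyx : y = x := by simpa using hy
                subst hyx
                refine Or.inr fun m' hm' => ?_
                have h1 : ¬ m' < m + 1 := fun hc => hmin m' hc hm'
                have h2 := Nat.find_min' hexa haL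
                omega)
          exact ⟨va, k1, dt1, h⟩
      obtain ⟨monoA, selfA, ⟨extA, hdtA, ndA, memA⟩, pathA⟩ :=
        auxA_facts f a k g (dt ++ [x]) va k1 dt1 ha
      have hK1 : ∀ z, (K0.get? z).isSome = true → (k1.get? z).isSome = true := by
        intro z hz
        obtain ⟨w, hw⟩ := Option.isSome_iff_exists.mp (hK0 z hz)
        simp [monoA z w hw]
      -- resolve operand b
      obtain ⟨vb, k2, dt2, hb⟩ :
          ∃ vb k2 dt2, solveAuxA f b k1 g dt1 = some (vb, k2, dt2) := by
        cases hkb : k1.get? b with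
        | some w => exact ⟨w, k1, dt1, auxA_known f b k1 g dt1 w hkb (by omega)⟩
        | none =>
          have hbL : b ∈ pvLayer g K0 dt0 m := by
            rcases hB with ⟨w, hw⟩ | h
            · have := hK1 b (by simp [hw])
              rw [hkb] at this; simp at this
            · exact h
          have hexb : ∃ n, b ∈ pvLayer g K0 dt0 n := ⟨m, hbL⟩
          obtain ⟨vb, k2, dt2, h⟩ := ih (Nat.find hexb) (by
              have := Nat.find_min' hexb hbL; omega)
            g K0 k1 dt0 b dt1 f (by have := Nat.find_min' hexb hbL; omega)
            (Nat.find_spec hexb) (fun m' hm' => Nat.find_min hexb hm') hK1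
            (by
              subst hdtA
              intro y hy
              rcases List.mem_append.mp hy with hy | hy
              · rcases List.mem_append.mp hy with hy | hy
                · rcases hinv y hy with h | h
                  · obtain ⟨w, hw⟩ := Option.isSome_iff_exists.mp h
                    exact Or.inl (by simp [monoA y w hw])
                  · exact Or.inr fun m' hm' => by
                      have h1 := h m' hm'
                      have h2 := Nat.find_min' hexb hbL
                      omega
                · have hyx : y = x := by simpa using hy
                  subst hyx
                  refine Or.inr fun m' hm' => ?_
                  have h1 : ¬ m' < m + 1 := fun hc => hmin m' hc hm'
                  have h2 := Nat.find_min' hexb hbL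
                  omega
              · exact Or.inl (memA y hy).2.2.1)
          exact ⟨vb, k2, dt2, h⟩
      -- apply the operator and assemble
      obtain ⟨c, hc⟩ : ∃ c, pvOpA? op va vb = some c := by
        rcases hop with (h | h) | h <;> subst h <;> exact ⟨_, rfl⟩
      refine ⟨c, k2.insert x c, dt2, ?_⟩
      simp only [solveAuxA]
      rw [hkx]
      dsimp only
      rw [if_neg hxdt, hgx]
      dsimp only
      rw [ha]
      dsimp only
      rw [hb]
      dsimp only
      rw [hc]

-- Simulation: one successful recursive call of A = a block of B's loop steps that consumes the
-- stack top, leaving A's resulting memo and path; the block needs at most 3·(new path nodes) + 1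
-- steps.
lemma simB (fA : Nat) :
    ∀ (x : String) (k : PySem.Dict String Int) (g : PySem.Dict String (List String))
      (dt : List String) (v : Int) (k' : PySem.Dict String Int) (dt' : List String),
    solveAuxA fA x k g dt = some (v, k', dt') →
    ∀ (rest : List String) (e : PySem.Set String),
    (∀ y ∈ e, y ∈ dt) →
    ∃ (n : Nat) (e' : PySem.Set String),
      (∀ f, solveAltLoop (f + n) (x :: rest) k g dt e = solveAltLoop f rest k' g dt' e') ∧
      (∀ y ∈ e, y ∈ e') ∧ (∀ y ∈ e', y ∈ dt') ∧
      n ≤ 3 * (dt'.length - dt.length) + 1 := by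
  induction fA with
  | zero => intro x k g dt v k' dt' h; simp [solveAuxA] at h
  | succ fA ih =>
    intro x k g dt v k' dt' h rest e he
    simp only [solveAuxA] at h
    cases hk : k.get? x with
    | some w =>
      rw [hk] at h
      simp only [Option.some.injEq, Prod.mk.injEq] at h
      obtain ⟨hv, hk', hdt'⟩ := h
      subst hv; subst hk'; subst hdt'
      refine ⟨1, e, ?_, fun y hy => hy, he, by omega⟩
      intro f
      simp [solveAltLoop, hk]
    | none =>
      rw [hk] at h
      by_cases hdt : x ∈ dt
      · simp [hdt] at h
      · simp only [hdt, if_false] at h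
        cases hg : g.get? x with
        | none => rw [hg] at h; simp at h
        | some l =>
          rw [hg] at h
          match l, h with
          | [], h => simp at h
          | [_], h => simp at h
          | [_, _], h => simp at h
          | _ :: _ :: _ :: _ :: _, h => simp at h
          | [a, op, b], h =>
            dsimp only at h
            cases ha : solveAuxA fA a k g (dt ++ [x]) with
            | none => rw [ha] at h; simp at h
            | some ra =>
              obtain ⟨va, k1, dt1⟩ := ra
              rw [ha] at h
              dsimp only at h
              cases hb : solveAuxA fA b k1 g dt1 with
              | none => rw [hb] at h; simp at h
              | some rb =>
                obtain ⟨vb, k2, dt2⟩ := rb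
                rw [hb] at h
                dsimp only at h
                cases hc : pvOpA? op va vb with
                | none => rw [hc] at h; simp at h
                | some c =>
                  rw [hc] at h
                  dsimp only at h
                  simp only [Option.some.injEq, Prod.mk.injEq] at h
                  obtain ⟨hv, hk', hdt'⟩ := h
                  subst hv; subst hk'; subst hdt'
                  obtain ⟨monoA, selfA, ⟨extA, hdtA, ndA, memA⟩, pathA⟩ :=
                    auxA_facts fA a k g (dt ++ [x]) va k1 dt1 ha
                  obtain ⟨monoB, selfB, ⟨extB, hdtB, ndB, memB⟩, pathB⟩ :=
                    auxA_facts fA b k1 g dt1 vb k2 dt2 hb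
                  have hxe : x ∉ e := fun hx => hdt (he x hx)
                  -- IH for a
                  obtain ⟨na, ea, stepA, subA, deA, bndA⟩ :=
                    ih a k g (dt ++ [x]) va k1 dt1 ha (b :: x :: rest) (PySem.Set.add e x)
                      (by
                        intro y hy
                        rcases (PySem.Set.mem_add e x y).mp hy with hy | hy
                        · exact List.mem_append.mpr (Or.inl (he y hy))
                        · subst hy; simp)
                  -- IH for b
                  obtain ⟨nb, eb, stepB, subB, deB, bndB⟩ :=
                    ih b k1 g dt1 vb k2 dt2 hb (x :: rest) ea deA
                  -- x resurfaces: its gate is applied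
                  have hk2x : k2.get? x = none := by
                    have h1 : k1.get? x = none := pathA x hk (by simp)
                    exact pathB x h1 (by rw [hdtA]; simp)
                  have hxeb : x ∈ eb := subB x (subA x ((PySem.Set.mem_add e x x).mpr (Or.inr rfl)))
                  have hk2a : k2.get? a = some va := by
                    obtain ⟨w, hw⟩ := Option.isSome_iff_exists.mp (by simp [selfA] : (k1.get? a).isSome = true)
                    have := monoB a va selfA
                    exact this
                  refine ⟨1 + na + nb + 1, eb, ?_, ?_, ?_, ?_⟩
                  · intro f
                    have harith : f + (1 + na + nb + 1) = ((f + 1 + nb) + na) + 1 := by omega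
                    rw [harith]
                    -- entry step: push operands
                    have step1 : solveAltLoop (((f + 1 + nb) + na) + 1) (x :: rest) k g dt e =
                        solveAltLoop ((f + 1 + nb) + na) (a :: b :: x :: rest) k g (dt ++ [x]) (PySem.Set.add e x) := by
                      simp only [solveAltLoop, hk, Option.isSome_none, Bool.false_eq_true,
                        if_false, hxe, if_neg hdt, hg]
                    rw [step1, stepA, stepB]
                    -- apply step
                    simp only [solveAltLoop, hk2x, Option.isSome_none, Bool.false_eq_true,
                      if_false, hxeb, if_true, hg, hk2a, selfB]
                    rw [show pvOpsB? op va vb = some c from (pvOps_agree op va vb).trans hc]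
                  · exact fun y hy => subB y (subA y ((PySem.Set.mem_add e x y).mpr (Or.inl hy)))
                  · exact deB
                  · simp only [hdtB, hdtA, List.length_append, List.length_cons,
                      List.length_nil] at bndA bndB ⊢
                    omega

lemma altLoop_nil (f : Nat) (k : PySem.Dict String Int) (g : PySem.Dict String (List String))
    (dt : List String) (e : PySem.Set String) : solveAltLoop f [] k g dt e = some k := by
  cases f <;> rfl

lemma layer_not_dt0 (g : PySem.Dict String (List String)) (k : PySem.Dict String Int)
    (dt0 : List String) (m : Nat) (y : String) (h : y ∈ pvLayer g k dt0 m) : y ∉ dt0 := by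
  cases m with
  | zero => simp [pvLayer] at h
  | succ m' =>
    simp only [pvLayer, List.mem_filter, Bool.and_eq_true, Bool.not_eq_true',
      List.contains_eq_mem, decide_eq_false_iff_not] at h
    exact h.2.1

-- ===== VERDICT (by name: the statement is the Claim_ definition above) =====
theorem solve_spec : Claim_equal_solve := by
  intro register known gates dependency_tree _ hpre
  unfold Spec_solve
  rcases hpre with hkreg | hlay
  · obtain ⟨v, hv⟩ := Option.isSome_iff_exists.mp hkreg
    have hA : solve register known gates dependency_tree = v := by
      unfold solve
      rw [auxA_known _ _ _ _ _ v hv (by omega)]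
    have hB : solve_alt register known gates dependency_tree = v := by
      simp only [solve_alt]
      simp only [solveAltLoop, hv, Option.isSome_some, if_true]
      rw [PySem.Dict.getD_eq_get?_getD, hv]
      rfl
    rw [hA, hB]
  · have hex : ∃ n, register ∈ pvLayer (PySem.Dict.ofList gates) (PySem.Dict.ofList known) (dependency_tree.getD []) n := ⟨gates.length, hlay⟩
    have hrle : Nat.find hex ≤ gates.length := Nat.find_min' hex hlay
    obtain ⟨v, k', dt', hrun⟩ :=
      cleanA (Nat.find hex) (PySem.Dict.ofList gates) (PySem.Dict.ofList known)
        (PySem.Dict.ofList known) (dependency_tree.getD []) register (dependency_tree.getD [])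
        (gates.length + 1) (by omega) (Nat.find_spec hex) (fun m hm => Nat.find_min hex hm)
        (fun z h => h)
        (by
          intro y hy
          exact Or.inr fun m hm => absurd hy (layer_not_dt0 _ _ _ m y hm))
    have hA : solve register known gates dependency_tree = v := by
      unfold solve
      rw [hrun]
    obtain ⟨monoF, selfF, ⟨ext, hdtF, ndF, memF⟩, _⟩ :=
      auxA_facts (gates.length + 1) register (PySem.Dict.ofList known) (PySem.Dict.ofList gates)
        (dependency_tree.getD []) v k' dt' hrun
    have hsub : ext ⊆ (PySem.Dict.ofList gates).keys := by
      intro y hy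
      by_contra hc
      have := (PySem.Dict.get?_eq_none_iff_not_mem_keys _ _).mpr hc
      have h2 := (memF y hy).2.2.2
      rw [this] at h2
      simp at h2
    have hlen : ext.length ≤ (PySem.Dict.ofList gates).keys.length :=
      (ndF.subperm hsub).length_le
    obtain ⟨n, e', hstep, _, _, hbnd⟩ :=
      simB (gates.length + 1) register (PySem.Dict.ofList known) (PySem.Dict.ofList gates)
        (dependency_tree.getD []) v k' dt' hrun [] PySem.Set.empty (by intro y hy; simp [PySem.Set.empty] at hy)
    have hnF : n ≤ 3 * (PySem.Dict.ofList gates).keys.length + 1 := by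
      rw [hdtF] at hbnd
      simp only [List.length_append] at hbnd
      omega
    have hloop : solveAltLoop (3 * (PySem.Dict.ofList gates).keys.length + 1) [register]
        (PySem.Dict.ofList known) (PySem.Dict.ofList gates) (dependency_tree.getD [])
        PySem.Set.empty = some k' := by
      have harith : 3 * (PySem.Dict.ofList gates).keys.length + 1 =
          (3 * (PySem.Dict.ofList gates).keys.length + 1 - n) + n := by omega
      rw [harith, hstep, altLoop_nil]
    have hB : solve_alt register known gates dependency_tree = v := by
      simp only [solve_alt]
      rw [hloop]
      dsimp only
      rw [PySem.Dict.getD_eq_get?_getD, selfF]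
      rfl
    rw [hA, hB]
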